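-- pv_equiv track=rewrite | github.com/rishitsaiya/CS312-AI-Lab | Mehul/Lab 2/Lab2GroupNo20/a.py | hill_climb_search
-- ===== SOURCE A (Python) =====
-- def hill_climb_search(a, k):
--     for i in range(4):
--         for j in range(4):
--             if len(k[i][j]) == 1:
--                 a[i][j] = k[i][j][0]
--                 return a
--     for i in range(4):
--         for j in range(4):
--             if len(k[i][j]) == 2:
--                 a[i][j] = k[i][j][0]
--                 return a
-- ===== SOURCE B (Python) =====
-- def hill_climb_search(a, k):
--     pair = None
--     for i in range(4):
--         for j in range(4):
--             n = len(k[i][j])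
--             if n == 1:
--                 a[i][j] = k[i][j][0]
--                 return a
--             if n == 2 and pair is None:
--                 pair = (i, j)
--     if pair is not None:
--         i, j = pair
--         a[i][j] = k[i][j][0]
--         return a
--     return None
-- ===== Notes on version B (the rewrite author's own statement) =====
-- stated objective: alternative
-- what changed: One row-major pass over the 16 cells that returns immediately on the first singleton while recording the first pair cell for use after the scan, instead of A's two separate full nested-loop passes.
import Mathlib
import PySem

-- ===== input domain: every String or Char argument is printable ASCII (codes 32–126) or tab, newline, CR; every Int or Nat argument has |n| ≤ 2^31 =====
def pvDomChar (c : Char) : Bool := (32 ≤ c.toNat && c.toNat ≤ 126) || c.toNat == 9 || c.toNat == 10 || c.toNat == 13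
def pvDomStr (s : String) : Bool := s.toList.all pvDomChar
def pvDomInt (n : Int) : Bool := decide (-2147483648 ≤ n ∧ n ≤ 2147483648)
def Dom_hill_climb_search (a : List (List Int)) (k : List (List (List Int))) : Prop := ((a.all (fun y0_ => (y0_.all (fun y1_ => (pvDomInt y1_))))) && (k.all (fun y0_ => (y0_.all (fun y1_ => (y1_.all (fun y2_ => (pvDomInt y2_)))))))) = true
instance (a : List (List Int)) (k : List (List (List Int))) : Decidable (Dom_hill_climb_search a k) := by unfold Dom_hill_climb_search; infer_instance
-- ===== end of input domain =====

-- B replaces A's two full nested-loop passes by ONE row-major pass that returns on the first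
-- singleton and records the first pair cell for after the scan (alternative decomposition, same cost
-- class). Both Pythons mutate `a` in place identically; the equivalence proved is about the return value.

-- shared helpers: k[i][j] and the in-place cell assignment a[i][j] = v (in range under Pre_)
def pvCell (k : List (List (List Int))) (i j : Nat) : List Int := (k.getD i []).getD j []
def pvSetCell (a : List (List Int)) (i j : Nat) (v : Int) : List (List Int) :=
  a.modify i (fun row => row.set j v)

-- ===== PORT A =====
-- one nested for-pass of A with early return: first (i,j) whose candidate list has length n
def pvFindLen (k : List (List (List Int))) (n : Nat) : Option (Nat × Nat) :=
  (List.range 4).findSome? (fun i => (List.range 4).findSome? (fun j =>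
    if (pvCell k i j).length = n then some (i, j) else none))

def hill_climb_search (a : List (List Int)) (k : List (List (List Int))) : Option (List (List Int)) :=
  match pvFindLen k 1 with
  | some (i, j) => some (pvSetCell a i j ((pvCell k i j).getD 0 0))
  | none =>
    match pvFindLen k 2 with
    | some (i, j) => some (pvSetCell a i j ((pvCell k i j).getD 0 0))
    | none => none

-- ===== PORT B =====
-- the 16 positions in row-major order
def pvPositions : List (Nat × Nat) := (List.range 4).flatMap (fun i => (List.range 4).map (fun j => (i, j)))

-- B's single pass: early return on a singleton, otherwise thread the `pair` accumulator
def pvScan (k : List (List (List Int))) : List (Nat × Nat) → Option (Nat × Nat) → Option (Nat × Nat)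
  | [], pair => pair
  | (i, j) :: rest, pair =>
    let n := (pvCell k i j).length
    if n = 1 then some (i, j)
    else pvScan k rest (if n = 2 && pair.isNone then some (i, j) else pair)

def hill_climb_search_alt (a : List (List Int)) (k : List (List (List Int))) : Option (List (List Int)) :=
  match pvScan k pvPositions none with
  | some (i, j) => some (pvSetCell a i j ((pvCell k i j).getD 0 0))
  | none => none

-- ===== PRECONDITION & SPEC =====
-- Pre_ is exactly the closed-form condition under which Python A returns normally (otherwise it
-- raises IndexError): either the first singleton cell of the row-major scan is reached without any
-- out-of-range access and is assignable in a, or k is a full 4x4 grid with no singleton and the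
-- first pair cell (if any) is assignable in a.
-- all cells scanned up to and including (i, j) are index-accessible in k
def pvAccB (k : List (List (List Int))) (i j : Nat) : Bool :=
  decide (i < k.length) && decide (j < (k.getD i []).length) &&
  (List.range i).all (fun i' => decide (4 ≤ (k.getD i' []).length))
-- (i, j) is the first position in row-major order whose candidate list has length n
def pvFirstAtB (k : List (List (List Int))) (n i j : Nat) : Bool :=
  pvAccB k i j && ((pvCell k i j).length == n) &&
  ((List.range 4).all fun i' => (List.range 4).all fun j' =>
    !(decide (i' < i) || (i' == i && decide (j' < j))) || ((pvCell k i' j').length != n))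
-- the assignment a[i][j] = v is index-accessible
def pvAssignB (a : List (List Int)) (i j : Nat) : Bool :=
  decide (i < a.length) && decide (j < (a.getD i []).length)
def pvFullKB (k : List (List (List Int))) : Bool :=
  decide (4 ≤ k.length) && (List.range 4).all (fun i => decide (4 ≤ (k.getD i []).length))

def Pre_hill_climb_search (a : List (List Int)) (k : List (List (List Int))) : Prop :=
  (((List.range 4).any fun i => (List.range 4).any fun j => pvFirstAtB k 1 i j && pvAssignB a i j) ||
   (pvFullKB k &&
    ((List.range 4).all fun i => (List.range 4).all fun j => (pvCell k i j).length != 1) &&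
    (((List.range 4).any fun i => (List.range 4).any fun j => pvFirstAtB k 2 i j && pvAssignB a i j) ||
     ((List.range 4).all fun i => (List.range 4).all fun j => (pvCell k i j).length != 2)))) = true
instance (a : List (List Int)) (k : List (List (List Int))) : Decidable (Pre_hill_climb_search a k) := by
  unfold Pre_hill_climb_search; infer_instance

def pvWitness_hill_climb_search : List (List Int) × List (List (List Int)) :=
  ([[0,0,0,0],[0,0,0,0],[0,0,0,0],[0,0,0,0]],
   [[[1,2],[1,2],[1,2],[1,2]],[[1,2],[1,2],[1,2],[1,2]],[[1,2],[1,2],[1,2],[1,2]],[[1,2],[1,2],[1,2],[1,2]]])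

def Spec_hill_climb_search (a : List (List Int)) (k : List (List (List Int))) (out : Option (List (List Int))) : Prop := out = hill_climb_search_alt a k
instance (a : List (List Int)) (k : List (List (List Int))) (out : Option (List (List Int))) : Decidable (Spec_hill_climb_search a k out) := by unfold Spec_hill_climb_search; infer_instance

-- ===== CLAIM (what is proved, stated in full; the proofs are below) =====
def Claim_equal_hill_climb_search : Prop := ∀ (a : List (List Int)) (k : List (List (List Int))), Dom_hill_climb_search a k → Pre_hill_climb_search a k → Spec_hill_climb_search a k (hill_climb_search a k)

-- ===== LEMMAS AND PROOFS =====
theorem findSome?_flatMap {α β γ : Type} (l : List α) (f : α → List β) (g : β → Option γ) :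
    (l.flatMap f).findSome? g = l.findSome? (fun x => (f x).findSome? g) := by
  induction l with
  | nil => rfl
  | cons x xs ih =>
    simp only [List.flatMap_cons, List.findSome?_append, ih]
    cases h : List.findSome? g (f x) <;> simp [h]

-- characterisation of B's accumulator pass in terms of A's two searches
theorem pvScan_eq (k : List (List (List Int))) (ps : List (Nat × Nat)) (pair : Option (Nat × Nat)) :
    pvScan k ps pair =
      (ps.findSome? (fun p => if (pvCell k p.1 p.2).length = 1 then some p else none)).or
        (pair.or (ps.findSome? (fun p => if (pvCell k p.1 p.2).length = 2 then some p else none))) := by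
  induction ps generalizing pair with
  | nil => cases pair <;> rfl
  | cons p rest ih =>
    obtain ⟨i, j⟩ := p
    by_cases h1 : (pvCell k i j).length = 1
    · simp [pvScan, h1]
    · by_cases h2 : (pvCell k i j).length = 2
      · cases pair <;> simp [pvScan, h2, ih]
      · simp [pvScan, h1, h2, ih]

theorem findSome?_positions (k : List (List (List Int))) (n : Nat) :
    pvPositions.findSome? (fun p => if (pvCell k p.1 p.2).length = n then some p else none) =
      pvFindLen k n := by
  simp [pvPositions, pvFindLen, findSome?_flatMap, List.findSome?_map, Function.comp_def]

-- ===== VERDICT (by name: the statement is the Claim_ definition above) =====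
theorem hill_climb_search_spec : Claim_equal_hill_climb_search := by
  intro a k _ _
  unfold Spec_hill_climb_search hill_climb_search hill_climb_search_alt
  rw [pvScan_eq, findSome?_positions, findSome?_positions]
  cases h1 : pvFindLen k 1 with
  | some p => simp [Option.or]
  | none => cases h2 : pvFindLen k 2 <;> simp [Option.or]
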